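-- pv_equiv track=rewrite | github.com/Francesca-uni/clustering-e-pianificazione-gpl | pianificazione_multi_veicolo.py | suddividi_in_gruppi
-- ===== SOURCE A (Python) =====
-- def suddividi_in_gruppi(clienti, min_size=3, max_size=8):
--     gruppi = []
--     i = 0
--     while i < len(clienti):
--         end = i + max_size
--         # Se l'ultimo gruppo ha meno di min_size clienti, li accorpa al gruppo precedente (se esiste),
--         if end >= len(clienti):
--             if len(clienti) - i < min_size and gruppi:
--                 gruppi[-1].extend(clienti[i:])
--             else:
--                 gruppi.append(clienti[i:])
--             break
--         else:
--             gruppi.append(clienti[i:end])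
--             i = end
--     return gruppi
-- ===== SOURCE B (Python) =====
-- def suddividi_in_gruppi(clienti, min_size=3, max_size=8):
--     # Plan the group sizes arithmetically with one divmod, then cut the list once.
--     n = len(clienti)
--     if n == 0:
--         return []
--     q, r = divmod(n, max_size)
--     last = r if r else max_size          # size of the final group before any merge
--     m = q if r else q - 1                # number of full groups before the final one
--     if m >= 1 and last < min_size:
--         sizes = [max_size] * (m - 1) + [max_size + last]
--     else:
--         sizes = [max_size] * m + [last]
--     out = []
--     pos = 0
--     for s in sizes:
--         out.append(clienti[pos:pos + s])
--         pos += s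
--     return out
-- ===== Notes on version B (the rewrite author's own statement) =====
-- stated objective: alternative
-- what changed: Instead of scanning and deciding the merge mid-loop as A does, B computes the whole partition plan arithmetically with one divmod (number of full groups, final-group size, merge decided by a closed-form comparison) and then cuts the list once along that precomputed size list.
import Mathlib
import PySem

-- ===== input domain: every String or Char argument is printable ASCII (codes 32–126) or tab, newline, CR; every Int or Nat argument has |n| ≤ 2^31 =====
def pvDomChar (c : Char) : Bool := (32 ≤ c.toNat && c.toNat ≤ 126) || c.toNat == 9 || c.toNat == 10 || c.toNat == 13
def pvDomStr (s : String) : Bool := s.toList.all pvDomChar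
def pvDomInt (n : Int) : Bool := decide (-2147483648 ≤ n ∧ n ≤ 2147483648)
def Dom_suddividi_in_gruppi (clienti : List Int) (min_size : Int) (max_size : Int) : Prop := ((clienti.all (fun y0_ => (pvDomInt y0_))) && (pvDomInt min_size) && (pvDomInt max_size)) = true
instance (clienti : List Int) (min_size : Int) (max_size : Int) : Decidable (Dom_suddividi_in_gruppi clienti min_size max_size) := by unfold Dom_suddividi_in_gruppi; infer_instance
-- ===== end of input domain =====

-- B replaces A's scan-and-decide loop by arithmetic planning: one divmod yields the whole
-- partition plan (full-group count, final-group size, merge decided by a closed-form test),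
-- then the list is cut once along the planned sizes; objective: alternative.  The equivalence
-- is about the return value (A builds fresh slices, no observable mutation of the arguments).

-- ===== PORT A =====
-- A's while loop, fuel-bounded (A diverges when max_size ≤ 0 and clienti ≠ []; outside Pre_).
-- gruppi[-1] under the guard 'gruppi' (nonempty) is ported as getLastD [].
def loopA (clienti : List Int) (min_size max_size : Int) : Nat → List (List Int) → Int → List (List Int)
  | 0, gruppi, _ => gruppi
  | fuel+1, gruppi, i =>
    if i < (clienti.length : Int) then
      let e := i + max_size
      if (clienti.length : Int) ≤ e then
        -- 'if end >= len(clienti)': last iteration, then break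
        if (clienti.length : Int) - i < min_size ∧ gruppi ≠ [] then
          gruppi.dropLast ++ [gruppi.getLastD [] ++ PySem.List.slice clienti (some i) none]
        else
          gruppi ++ [PySem.List.slice clienti (some i) none]
      else
        loopA clienti min_size max_size fuel (gruppi ++ [PySem.List.slice clienti (some i) (some e)]) e
    else gruppi

def suddividi_in_gruppi (clienti : List Int) (min_size : Int) (max_size : Int) : List (List Int) :=
  loopA clienti min_size max_size (clienti.length + 1) [] 0

-- ===== PORT B =====
-- B's cutting loop: 'for s in sizes: out.append(clienti[pos:pos+s]); pos += s'
def cutB (clienti : List Int) : List Int → List (List Int) → Int → List (List Int)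
  | [], out, _ => out
  | s :: rest, out, pos =>
      cutB clienti rest (out ++ [PySem.List.slice clienti (some pos) (some (pos + s))]) (pos + s)

-- Python's '[x] * k' for possibly-negative k is List.replicate k.toNat x (negative count → [])
def suddividi_in_gruppi_alt (clienti : List Int) (min_size : Int) (max_size : Int) : List (List Int) :=
  let n : Int := clienti.length
  if n = 0 then []
  else
    let q := PySem.Int.floordiv n max_size
    let r := PySem.Int.mod n max_size
    let last := if r ≠ 0 then r else max_size
    let m := if r ≠ 0 then q else q - 1
    let sizes :=
      if 1 ≤ m ∧ last < min_size then
        List.replicate (m - 1).toNat max_size ++ [max_size + last]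
      else
        List.replicate m.toNat max_size ++ [last]
    cutB clienti sizes [] 0

-- ===== PRECONDITION & SPEC =====
-- Pre_ excludes only max_size ≤ 0 with clienti ≠ []: there A's while loop never terminates
-- (i never reaches len(clienti)), so A returns on nothing Pre_ throws away.
def Pre_suddividi_in_gruppi (clienti : List Int) (min_size : Int) (max_size : Int) : Prop :=
  0 < max_size ∨ clienti = []
instance (clienti : List Int) (min_size : Int) (max_size : Int) : Decidable (Pre_suddividi_in_gruppi clienti min_size max_size) := by unfold Pre_suddividi_in_gruppi; infer_instance
def pvWitness_suddividi_in_gruppi : List Int × Int × Int := ([1, 2, 3, 4, 5], 3, 2)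

def Spec_suddividi_in_gruppi (clienti : List Int) (min_size : Int) (max_size : Int) (out : List (List Int)) : Prop := out = suddividi_in_gruppi_alt clienti min_size max_size
instance (clienti : List Int) (min_size : Int) (max_size : Int) (out : List (List Int)) : Decidable (Spec_suddividi_in_gruppi clienti min_size max_size out) := by unfold Spec_suddividi_in_gruppi; infer_instance

-- ===== CLAIM (what is proved, stated in full; the proofs are below) =====
def Claim_equal_suddividi_in_gruppi : Prop := ∀ (clienti : List Int) (min_size : Int) (max_size : Int), Dom_suddividi_in_gruppi clienti min_size max_size → Pre_suddividi_in_gruppi clienti min_size max_size → Spec_suddividi_in_gruppi clienti min_size max_size (suddividi_in_gruppi clienti min_size max_size)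

-- ===== LEMMAS AND PROOFS =====

lemma pyRange_pos_nil (a b s : Int) (hs : 0 < s) (h : b ≤ a) : PySem.List.pyRange a b s = [] := by
  rw [PySem.List.pyRange_of_pos _ _ hs]
  simp [not_lt.mpr h]

lemma pyRange_pos_cons (a b s : Int) (hs : 0 < s) (h : a < b) :
    PySem.List.pyRange a b s = a :: PySem.List.pyRange (a + s) b s := by
  rw [PySem.List.pyRange_of_pos _ _ hs, PySem.List.pyRange_of_pos _ _ hs]
  by_cases h2 : a + s < b
  · have key : (b - a + s - 1) / s = (b - (a + s) + s - 1) / s + 1 := by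
      have heq : b - a + s - 1 = (b - (a + s) + s - 1) + 1 * s := by ring
      rw [heq, Int.add_mul_ediv_right _ _ (by omega : s ≠ 0)]
    have hnn : 0 ≤ (b - (a + s) + s - 1) / s := Int.ediv_nonneg (by omega) (by omega)
    have hq : ((b - a + s - 1) / s).toNat = ((b - (a + s) + s - 1) / s).toNat + 1 := by omega
    simp only [if_pos h, if_pos h2, hq, List.range_succ_eq_map, List.map_cons, List.map_map]
    congr 1
    · push_cast; ring
    · apply List.map_congr_left
      intro k _
      simp only [Function.comp_apply, Nat.succ_eq_add_one]
      push_cast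
      ring
  · have hq1 : (b - a + s - 1) / s = 1 := by
      have h1 : (1 : Int) ≤ (b - a + s - 1) / s := (Int.le_ediv_iff_mul_le hs).mpr (by omega)
      have h2' : (b - a + s - 1) / s < 2 := (Int.ediv_lt_iff_lt_mul hs).mpr (by omega)
      omega
    simp [if_pos h, not_lt.mpr (not_lt.mp h2), hq1, List.range_succ]

-- the merge fix-up applied to A's chunk list, as a proof-side normal form
def fixB (min_size : Int) (chunks : List (List Int)) : List (List Int) :=
  if 1 < chunks.length ∧ (((chunks.getLastD []).length : Int) < min_size) then
    chunks.dropLast.dropLast ++ [chunks.dropLast.getLastD [] ++ chunks.getLastD []]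
  else chunks

lemma loopA_eq (clienti : List Int) (min_size max_size : Int) (hmax : 0 < max_size) :
    ∀ (fuel : Nat) (i : Int) (g : List (List Int)), 0 ≤ i → i < (clienti.length : Int) →
      (clienti.length : Int) - i ≤ (fuel : Int) →
      loopA clienti min_size max_size fuel g i =
        fixB min_size (g ++ (PySem.List.pyRange i (clienti.length : Int) max_size).map
          (fun j => PySem.List.slice clienti (some j) (some (j + max_size)))) := by
  intro fuel
  induction fuel with
  | zero => intro i g h0 hlt hf; exfalso; simp at hf; omega
  | succ fuel ih =>
    intro i g h0 hlt hf
    simp only [loopA, if_pos hlt]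
    by_cases he : (clienti.length : Int) ≤ i + max_size
    · rw [if_pos he, pyRange_pos_cons i _ _ hmax hlt, pyRange_pos_nil _ _ _ hmax he]
      have hslice : PySem.List.slice clienti (some i) (some (i + max_size)) =
          PySem.List.slice clienti (some i) none := by
        rw [PySem.List.slice_toNat _ h0 (by omega), PySem.List.slice_from _ h0]
        apply List.take_of_length_le
        simp only [List.length_drop]
        omega
      simp only [List.map_cons, List.map_nil, hslice]
      set c := PySem.List.slice clienti (some i) none with hc
      have hclen : (c.length : Int) = (clienti.length : Int) - i := by
        rw [hc, PySem.List.slice_from _ h0]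
        simp only [List.length_drop]
        omega
      have hgl : (g ++ [c]).getLastD [] = c := List.getLastD_concat
      have hcond : (1 < (g ++ [c]).length ∧ ((((g ++ [c]).getLastD []).length : Int) < min_size))
          ↔ ((clienti.length : Int) - i < min_size ∧ g ≠ []) := by
        rw [hgl, hclen, List.length_append]
        constructor
        · rintro ⟨h1, h2⟩
          refine ⟨h2, ?_⟩
          intro hg; subst hg; simp at h1
        · rintro ⟨h1, h2⟩
          exact ⟨by have := List.length_pos_of_ne_nil h2; simp; omega, h1⟩
      rw [fixB]
      by_cases hm : (clienti.length : Int) - i < min_size ∧ g ≠ []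
      · rw [if_pos hm, if_pos (hcond.mpr hm), List.dropLast_concat, hgl]
      · rw [if_neg hm, if_neg (fun h => hm (hcond.mp h))]
    · rw [if_neg he,
        ih (i + max_size) (g ++ [PySem.List.slice clienti (some i) (some (i + max_size))])
          (by omega) (by omega) (by push_cast at hf ⊢; omega),
        pyRange_pos_cons i _ _ hmax hlt]
      simp [List.append_assoc]


lemma cons_map_succ {α : Type} (g : Nat → α) (k : Nat) :
    (List.range (k + 1)).map g = g 0 :: (List.range k).map (fun j => g (j + 1)) := by
  rw [List.range_succ_eq_map, List.map_cons, List.map_map]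
  rfl

-- a positive-step range covering exactly k steps plus a partial last one
lemma pyRange_count (a s L : Int) (k : Nat) (hs : 0 < s) (hL0 : 0 < L) (hLs : L ≤ s) :
    PySem.List.pyRange a (a + k * s + L) s =
      (List.range (k + 1)).map (fun (j : Nat) => a + (j : Int) * s) := by
  induction k generalizing a with
  | zero =>
    rw [pyRange_pos_cons a _ s hs (by push_cast; omega),
        pyRange_pos_nil _ _ _ hs (by push_cast; omega)]
    norm_num [List.range_succ]
  | succ k ih =>
    rw [pyRange_pos_cons a _ s hs (by push_cast; nlinarith [Int.mul_nonneg (by positivity : (0:Int) ≤ (k:Int)+1) (le_of_lt hs)])]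
    have h0 : a + (↑(k + 1)) * s + L = (a + s) + ↑k * s + L := by push_cast; ring
    rw [h0, ih (a + s), cons_map_succ (fun (j : Nat) => a + (j : Int) * s) (k + 1)]
    congr 1
    · norm_num
    · apply List.map_congr_left
      intro j _
      push_cast; ring

-- cutting along k equal sizes peels k uniform slices
lemma cutB_replicate (clienti : List Int) (s : Int) (k : Nat) :
    ∀ (pos : Int) (out : List (List Int)) (tailS : List Int),
      cutB clienti (List.replicate k s ++ tailS) out pos =
        cutB clienti tailS
          (out ++ (List.range k).map (fun (j : Nat) =>
            PySem.List.slice clienti (some (pos + (j : Int) * s)) (some (pos + (j : Int) * s + s))))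
          (pos + (k : Int) * s) := by
  induction k with
  | zero => intro pos out tailS; simp
  | succ k ih =>
    intro pos out tailS
    simp only [List.replicate_succ, List.cons_append, cutB]
    rw [ih (pos + s)]
    have h1 : pos + s + (k : Int) * s = pos + (↑(k + 1)) * s := by push_cast; ring
    rw [h1]
    congr 1
    rw [cons_map_succ (fun (j : Nat) => PySem.List.slice clienti (some (pos + (j : Int) * s)) (some (pos + (j : Int) * s + s))) k,
        List.append_assoc, List.singleton_append]
    congr 1
    congr 1
    · norm_num
    · apply List.map_congr_left
      intro j _
      congr 2 <;> push_cast <;> ring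

-- a slice whose ends both reach past the list is the same clamped slice
lemma slice_clamp_eq (xs : List Int) (a b c : Int) (ha : 0 ≤ a)
    (hb : (xs.length : Int) ≤ b) (hc : (xs.length : Int) ≤ c) :
    PySem.List.slice xs (some a) (some b) = PySem.List.slice xs (some a) (some c) := by
  rw [PySem.List.slice_toNat _ ha (by omega), PySem.List.slice_toNat _ ha (by omega)]
  rw [List.take_of_length_le (by simp only [List.length_drop]; omega),
      List.take_of_length_le (by simp only [List.length_drop]; omega)]

-- adjacent slices concatenate
lemma slice_append (xs : List Int) (a b c : Int) (ha : 0 ≤ a) (hab : a ≤ b) (hbc : b ≤ c) :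
    PySem.List.slice xs (some a) (some b) ++ PySem.List.slice xs (some b) (some c) =
      PySem.List.slice xs (some a) (some c) := by
  rw [PySem.List.slice_toNat _ ha (by omega), PySem.List.slice_toNat _ (by omega) (by omega),
      PySem.List.slice_toNat _ ha (by omega)]
  have h1 : xs.drop b.toNat = (xs.drop a.toNat).drop (b.toNat - a.toNat) := by
    rw [List.drop_drop]; congr 1; omega
  have h2 : c.toNat - a.toNat = (b.toNat - a.toNat) + (c.toNat - b.toNat) := by omega
  rw [h1, h2, List.take_add]

-- ===== VERDICT (by name: the statement is the Claim_ definition above) =====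
theorem suddividi_in_gruppi_spec : Claim_equal_suddividi_in_gruppi := by
  intro clienti min_size max_size _hdom hpre
  unfold Spec_suddividi_in_gruppi
  by_cases hnil : clienti = []
  · subst hnil
    simp [suddividi_in_gruppi, loopA, suddividi_in_gruppi_alt]
  · have hmax : 0 < max_size := by
      rcases hpre with h | h
      · exact h
      · exact absurd h hnil
    have hlen : 0 < (clienti.length : Int) := by
      have := List.length_pos_of_ne_nil hnil
      exact_mod_cast this
    set n : Int := (clienti.length : Int) with hn
    set q := PySem.Int.floordiv n max_size with hqdef
    set r := PySem.Int.mod n max_size with hrdef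
    have hqr : q * max_size + r = n := PySem.Int.floordiv_mul_add_mod n max_size
    have hr0 : 0 ≤ r := PySem.Int.mod_nonneg n hmax
    have hrm : r < max_size := PySem.Int.mod_lt n hmax
    -- M = number of full groups before the final one, L = final group size before any merge
    obtain ⟨M, L, hML, hL0, hLm, hm_eq, hlast_eq⟩ :
        ∃ (M : Nat) (L : Int), n = (M : Int) * max_size + L ∧ 0 < L ∧ L ≤ max_size ∧
          (if r ≠ 0 then q else q - 1) = (M : Int) ∧ (if r ≠ 0 then r else max_size) = L := by
      by_cases hr : r ≠ 0
      · have hq0 : 0 ≤ q := by nlinarith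
        refine ⟨q.toNat, r, ?_, by omega, by omega, ?_, if_pos hr⟩
        · rw [Int.toNat_of_nonneg hq0]; omega
        · rw [if_pos hr, Int.toNat_of_nonneg hq0]
      · rw [not_ne_iff] at hr
        have hq1 : 1 ≤ q := by nlinarith
        refine ⟨(q - 1).toNat, max_size, ?_, hmax, le_refl _, ?_, if_neg (not_ne_iff.mpr hr)⟩
        · rw [Int.toNat_of_nonneg (by omega : (0:Int) ≤ q - 1)]
          have hring : (q - 1) * max_size + max_size = q * max_size := by ring
          omega
        · rw [if_neg (not_ne_iff.mpr hr), Int.toNat_of_nonneg (by omega : (0:Int) ≤ q - 1)]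
    -- A's side: the chunk list
    have hA : suddividi_in_gruppi clienti min_size max_size =
        fixB min_size ((List.range (M + 1)).map (fun (j : Nat) =>
          PySem.List.slice clienti (some ((j : Int) * max_size)) (some ((j : Int) * max_size + max_size)))) := by
      rw [suddividi_in_gruppi,
        loopA_eq clienti min_size max_size hmax (clienti.length + 1) 0 [] le_rfl hlen
          (by push_cast; omega)]
      have hcover : n = 0 + (M : Int) * max_size + L := by omega
      rw [List.nil_append, ← hn, hcover, pyRange_count 0 max_size L M hmax hL0 hLm,
        List.map_map]
      congr 1
      apply List.map_congr_left
      intro j _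
      simp [Function.comp]
    -- shared abbreviation
    set cf : Nat → List Int := fun (j : Nat) =>
      PySem.List.slice clienti (some ((j : Int) * max_size)) (some ((j : Int) * max_size + max_size)) with hcf
    -- facts about the last chunk
    have hlastlen : ((cf M).length : Int) = L := by
      rw [hcf]
      simp only []
      rw [PySem.List.slice_toNat _ (by positivity) (by positivity)]
      simp only [List.length_take, List.length_drop]
      have h1 : (((M : Int) * max_size).toNat : Int) = (M : Int) * max_size :=
        Int.toNat_of_nonneg (by positivity)
      have h2 : (((M : Int) * max_size + max_size).toNat : Int) = (M : Int) * max_size + max_size :=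
        Int.toNat_of_nonneg (by positivity)
      omega
    -- B's side
    rw [hA, suddividi_in_gruppi_alt]
    simp only [← hn, if_neg (by omega : ¬ n = 0), ← hqdef, ← hrdef, hm_eq, hlast_eq]
    by_cases hg : 1 ≤ (M : Int) ∧ L < min_size
    · -- merged case
      have hM1 : 1 ≤ M := by exact_mod_cast hg.1
      rw [if_pos hg]
      have hMnat : ((M : Int) - 1).toNat = M - 1 := by omega
      rw [hMnat, cutB_replicate]
      simp only [cutB]
      -- fixB on chunks: guard holds
      have hchunks : (List.range (M + 1)).map cf = ((List.range M).map cf) ++ [cf M] := by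
        rw [List.range_succ, List.map_append]; rfl
      have hguard : 1 < ((List.range (M + 1)).map cf).length ∧
          ((((List.range (M + 1)).map cf).getLastD []).length : Int) < min_size := by
        constructor
        · simp only [List.length_map, List.length_range]; omega
        · rw [hchunks, List.getLastD_concat, hlastlen]; exact hg.2
      rw [fixB, if_pos hguard, hchunks, List.dropLast_concat, List.getLastD_concat]
      have hchunks2 : (List.range M).map cf = ((List.range (M - 1)).map cf) ++ [cf (M - 1)] := by
        have : M = (M - 1) + 1 := by omega
        rw [this, List.range_succ, List.map_append]
        simp only [List.map_cons, List.map_nil]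
        congr 3
      rw [hchunks2, List.dropLast_concat, List.getLastD_concat, List.nil_append]
      have hmid : ((M - 1 : Nat) : Int) * max_size + max_size = (M : Int) * max_size := by
        have hc : ((M - 1 : Nat) : Int) = (M : Int) - 1 := by omega
        rw [hc]; ring
      congr 1
      · apply List.map_congr_left
        intro j _
        rw [hcf]
        norm_num
      · congr 1
        have ha : (0 : Int) ≤ ((M - 1 : Nat) : Int) * max_size := by positivity
        symm
        calc PySem.List.slice clienti (some (0 + ((M - 1 : Nat) : Int) * max_size))
              (some (0 + ((M - 1 : Nat) : Int) * max_size + (max_size + L)))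
            = PySem.List.slice clienti (some (((M - 1 : Nat) : Int) * max_size))
              (some ((M : Int) * max_size + max_size)) := by
              rw [zero_add]
              exact slice_clamp_eq clienti _ _ _ ha (by omega) (by omega)
          _ = PySem.List.slice clienti (some (((M - 1 : Nat) : Int) * max_size))
                (some (((M - 1 : Nat) : Int) * max_size + max_size)) ++
              PySem.List.slice clienti (some (((M - 1 : Nat) : Int) * max_size + max_size))
                (some ((M : Int) * max_size + max_size)) :=
              (slice_append clienti _ _ _ ha (by omega) (by omega)).symm
          _ = cf (M - 1) ++ cf M := by simp only [hcf]; rw [hmid]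
    · -- unmerged case
      rw [if_neg hg]
      have hMnat2 : ((M : Int)).toNat = M := by omega
      rw [hMnat2, cutB_replicate]
      simp only [cutB]
      have hchunks : (List.range (M + 1)).map cf = ((List.range M).map cf) ++ [cf M] := by
        rw [List.range_succ, List.map_append]; rfl
      have hguard : ¬ (1 < ((List.range (M + 1)).map cf).length ∧
          ((((List.range (M + 1)).map cf).getLastD []).length : Int) < min_size) := by
        intro ⟨h1, h2⟩
        rw [hchunks, List.getLastD_concat, hlastlen] at h2
        simp only [List.length_map, List.length_range] at h1
        exact hg ⟨by omega, h2⟩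
      rw [fixB, if_neg hguard, hchunks]
      congr 1
      · simp [hcf]
      · have : PySem.List.slice clienti (some (0 + (M : Int) * max_size))
            (some (0 + (M : Int) * max_size + L)) = cf M := by
          rw [hcf]
          simp only [zero_add]
          exact slice_clamp_eq clienti _ _ _ (by positivity) (by omega) (by omega)
        rw [this]
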